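-- pv_equiv track=rewrite | github.com/AlaBayoudh/job-and-skills | helpers/skillsdb_functions.py | function_compound_extraction
-- ===== SOURCE A (Python) =====
-- from operator import itemgetter, attrgetter
--
-- def function_compound_extraction(dep, text, pos):
--     """    # This function extracts compound nouns
--     # Compound nouns usually explain the meaning of the skill without the need of verbs or other adjective
--     # Example  : manage the operation of propulsion plant machinery -- > propulsion plant machinery
--
--     Arguments:
--         dep {[list]} -- [list of dependencies]
--         text {[list]} -- [list of words composing the skill]
--         pos {[list]} -- [list of positions]
--
--     Returns:
--         [str] -- [The skill after reduction]
--     """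
--
--
--
--     ind = 99
--     if "PUNCT" in pos:
--         ind = pos.index("PUNCT")
--         aux = text[ind-1:ind+2]
--         dep_a = dep[ind+1]
--         pos_a = pos[ind+1]
--         text[ind-1] = "".join(aux)
--         del text[ind:ind+2]
--         del dep[ind:ind+2]
--         del pos[ind:ind+2]
--         dep[ind-1] = dep_a
--         pos[ind-1] = pos_a
--
--     Reduced = "No change"
--     indexs = []
--     if "compound" in dep:
--         for token in range(len(dep)):
--             if dep[token] == "compound":
--                 indexs.append(token)
--         if max(indexs) - min(indexs) == len(indexs) - 1:
--             indexs.append(max(indexs)+1)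
--
--         else:
--             for i in range(len(indexs)-1):
--                 if indexs[i+1] - indexs[i] != 1:
--                     indexs = indexs[:i+1]
--                     break
--             indexs.append(max(indexs)+1)
--         # Get New text and pos
--         New_text = list(itemgetter(*indexs)(text))
--         # indexs projection on the original text
--         # example input: [2,3] ,text = [C1,C2,C3,C4]
--         ## output : [C3,C4]
--         Reduced = " ".join(New_text)
--     else:
--         for i in range(len(text)):
--             if "-" in text[i]:
--                 Reduced = text[i]
--                 break
--     if Reduced != " ".join(text):
--         return Reduced + "_com"
--     else:
--         return "No change"
-- ===== SOURCE B (Python) =====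
-- def function_compound_extraction(dep, text, pos):
--     # Same task as A: merge the PUNCT token into its neighbour, then keep the first
--     # contiguous run of "compound" tokens plus the word that follows it.
--     # (Mutates dep/text/pos in place exactly like A for the first PUNCT at index >= 1.)
--     if "PUNCT" in pos:
--         i = pos.index("PUNCT")
--         text[i-1:i+2] = ["".join(text[i-1:i+2])]
--         dep[i-1:i+2] = [dep[i+1]]
--         pos[i-1:i+2] = [pos[i+1]]
--     if "compound" in dep:
--         j = dep.index("compound")
--         k = j
--         while k + 1 < len(dep) and dep[k+1] == "compound":
--             k += 1
--         # explicit indexing: text[k+1] raises IndexError exactly when A's itemgetter does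
--         reduced = " ".join([text[m] for m in range(j, k + 2)])
--     else:
--         reduced = next((w for w in text if "-" in w), "No change")
--     return reduced + "_com" if reduced != " ".join(text) else "No change"
-- ===== Notes on version B (the rewrite author's own statement) =====
-- stated objective: simpler
-- what changed: The compound block's collect-all-indices list, min/max global-contiguity test and truncate-at-first-gap loop are replaced by a single forward scan over the first run of 'compound' dependencies, the PUNCT merge's five in-place statements become three slice assignments, and the dash scan becomes next() with a default.
-- outside the precondition, e.g. on function_compound_extraction(['', '', ''], ['', '', '-'], ['PUNCT', '', '']): A returns 'No change_com', B returns '-_com'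
import Mathlib
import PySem

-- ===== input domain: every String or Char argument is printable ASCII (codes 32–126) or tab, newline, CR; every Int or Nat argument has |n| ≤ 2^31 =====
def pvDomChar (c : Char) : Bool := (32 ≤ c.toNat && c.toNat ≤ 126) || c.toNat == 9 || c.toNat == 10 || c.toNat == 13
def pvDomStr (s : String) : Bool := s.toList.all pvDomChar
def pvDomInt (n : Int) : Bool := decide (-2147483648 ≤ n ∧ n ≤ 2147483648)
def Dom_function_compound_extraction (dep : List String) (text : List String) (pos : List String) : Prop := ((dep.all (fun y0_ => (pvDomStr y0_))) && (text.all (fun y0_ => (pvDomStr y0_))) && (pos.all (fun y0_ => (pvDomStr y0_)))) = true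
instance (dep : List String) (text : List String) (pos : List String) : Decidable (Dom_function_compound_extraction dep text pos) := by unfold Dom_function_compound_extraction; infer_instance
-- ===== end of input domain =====

-- B rewrites A's compound-index bookkeeping (collect-all-indices, global min/max contiguity
-- test, truncate-at-first-gap) as one forward scan over the first compound run, and the
-- PUNCT merge as single slice assignments; equal return value on Pre_ (both mutate in place).

-- ===== PORT A =====
-- A's `for i in range(len(indexs)-1): if indexs[i+1]-indexs[i] != 1: indexs = indexs[:i+1]; break`
def pvTruncA (l : List Nat) (i : Nat) : List Nat :=
  if _h : i < l.length - 1 then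
    if l.getD (i + 1) 0 - l.getD i 0 ≠ 1 then l.take (i + 1)
    else pvTruncA l (i + 1)
  else l
termination_by l.length - 1 - i

-- A's `for i in range(len(text)): if "-" in text[i]: Reduced = text[i]; break` (Reduced = "No change" before it)
def pvDashLoopA (text : List String) (i : Nat) : String :=
  if _h : i < text.length then
    if PySem.Str.isIn "-" (text.getD i "") then text.getD i ""
    else pvDashLoopA text (i + 1)
  else "No change"
termination_by text.length - i

-- A from the `Reduced = "No change"` line on (operates on the already-mutated dep/text)
def pvStage2A (dep1 text1 : List String) : String :=
  if "compound" ∈ dep1 then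
    let indexs := (List.range dep1.length).foldl
        (fun acc token => if dep1.getD token "" == "compound" then acc ++ [token] else acc) ([] : List Nat)
    let indexs2 :=
      if ((PySem.List.max? indexs (fun x => x)).getD 0) - ((PySem.List.min? indexs (fun x => x)).getD 0)
          == indexs.length - 1 then
        indexs ++ [((PySem.List.max? indexs (fun x => x)).getD 0) + 1]
      else
        let tr := pvTruncA indexs 0
        tr ++ [((PySem.List.max? tr (fun x => x)).getD 0) + 1]
    -- itemgetter(*indexs)(text): an out-of-range index is an IndexError, excluded by Pre_
    let newText := indexs2.map (fun idx => text1.getD idx "")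
    let reduced := PySem.Str.join " " newText
    if reduced ≠ PySem.Str.join " " text1 then reduced ++ "_com" else "No change"
  else
    let reduced := pvDashLoopA text1 0
    if reduced ≠ PySem.Str.join " " text1 then reduced ++ "_com" else "No change"

def function_compound_extraction (dep : List String) (text : List String) (pos : List String) : String :=
  -- A mutates dep/text/pos in place; pos (and pos_a) is never read after the merge block,
  -- so only the mutated dep/text are carried (the claim is about the return value).
  let ind := (PySem.List.index? pos "PUNCT").getD 0
  let dt :=
    if "PUNCT" ∈ pos then
      let aux := PySem.List.slice text (some ((ind : Int) - 1)) (some ((ind : Int) + 2))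
      let dep_a := PySem.List.pyGetD dep ((ind : Int) + 1) ""     -- dep[ind+1]; IndexError outside Pre_
      let text' := PySem.List.pySetD text ((ind : Int) - 1) (PySem.Str.join "" aux)
      let text'' := text'.take ind ++ text'.drop (ind + 2)        -- del text[ind:ind+2]
      let dep' := dep.take ind ++ dep.drop (ind + 2)              -- del dep[ind:ind+2]
      let dep'' := PySem.List.pySetD dep' ((ind : Int) - 1) dep_a -- dep[ind-1] = dep_a
      (dep'', text'')
    else (dep, text)
  pvStage2A dt.1 dt.2

-- ===== PORT B =====
-- Python slice assignment xs[a:b] = v (clamped bounds; an empty slice inserts at the start bound)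
def pvSliceAssign (xs : List String) (a b : Int) (v : List String) : List String :=
  let a' := PySem.List.clampIdx xs.length a
  let b' := max a' (PySem.List.clampIdx xs.length b)
  xs.take a' ++ v ++ xs.drop b'

-- B's `while k + 1 < len(dep) and dep[k+1] == "compound": k += 1`
def pvRunEnd (dep : List String) (k : Nat) : Nat :=
  if _h : k + 1 < dep.length then
    if dep.getD (k + 1) "" == "compound" then pvRunEnd dep (k + 1) else k
  else k
termination_by dep.length - k

-- B's `next((w for w in text if "-" in w), "No change")`
def pvFirstDash : List String → Option String
  | [] => none
  | w :: ws => if PySem.Str.isIn "-" w then some w else pvFirstDash ws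

-- B from the `if "compound" in dep:` line on
def pvStage2B (dep1 text1 : List String) : String :=
  let reduced :=
    if "compound" ∈ dep1 then
      let j := (PySem.List.index? dep1 "compound").getD 0
      let k := pvRunEnd dep1 j
      -- text[m] for m in range(j, k+2): an out-of-range index is an IndexError, excluded by Pre_
      PySem.Str.join " " ((PySem.List.pyRange (j : Int) ((k : Int) + 2) 1).map
        (fun m => PySem.List.pyGetD text1 m ""))
    else (pvFirstDash text1).getD "No change"
  if reduced ≠ PySem.Str.join " " text1 then reduced ++ "_com" else "No change"

def function_compound_extraction_alt (dep : List String) (text : List String) (pos : List String) : String :=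
  -- B mutates dep/text/pos in place too; pos is never read after the merge block.
  let i := (PySem.List.index? pos "PUNCT").getD 0
  let text1 :=
    if "PUNCT" ∈ pos then
      pvSliceAssign text ((i : Int) - 1) ((i : Int) + 2)
        [PySem.Str.join "" (PySem.List.slice text (some ((i : Int) - 1)) (some ((i : Int) + 2)))]
    else text
  let dep1 :=
    if "PUNCT" ∈ pos then
      pvSliceAssign dep ((i : Int) - 1) ((i : Int) + 2) [PySem.List.pyGetD dep ((i : Int) + 1) ""]
    else dep
  pvStage2B dep1 text1

-- ===== PRECONDITION & SPEC =====
-- Pre_ excludes (a) inputs where both programs raise IndexError: a first "PUNCT" whose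
-- neighbours dep[i+1]/pos[i+1]/text[i-1] do not exist, or a compound run whose following
-- text index is out of range; and (b) pos whose first "PUNCT" is at index 0, where A's
-- text[-1]/dep[-1] negative-index wraparound and B's slice-assignment result are both
-- implementation accidents — neither value is specified behaviour.
def Pre_function_compound_extraction (dep : List String) (text : List String) (pos : List String) : Prop :=
  let i := (PySem.List.index? pos "PUNCT").getD 0
  (("PUNCT" ∈ pos) → 1 ≤ i ∧ i + 2 ≤ dep.length ∧ i + 2 ≤ pos.length ∧ i ≤ text.length) ∧
  (let dep1 := if "PUNCT" ∈ pos then dep.take (i - 1) ++ [dep.getD (i + 1) ""] ++ dep.drop (i + 2) else dep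
   let tlen := if "PUNCT" ∈ pos then i + (text.length - (i + 2)) else text.length
   "compound" ∈ dep1 →
     (PySem.List.index? dep1 "compound").getD 0
       + ((dep1.drop ((PySem.List.index? dep1 "compound").getD 0)).takeWhile (fun s => s == "compound")).length
       < tlen)
instance (dep : List String) (text : List String) (pos : List String) : Decidable (Pre_function_compound_extraction dep text pos) := by unfold Pre_function_compound_extraction; infer_instance

def pvWitness_function_compound_extraction : List String × List String × List String :=
  (["compound", "x"], ["propulsion", "plant"], ["NOUN", "NOUN"])

def Spec_function_compound_extraction (dep : List String) (text : List String) (pos : List String) (out : String) : Prop := out = function_compound_extraction_alt dep text pos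
instance (dep : List String) (text : List String) (pos : List String) (out : String) : Decidable (Spec_function_compound_extraction dep text pos out) := by unfold Spec_function_compound_extraction; infer_instance

-- ===== CLAIM (what is proved, stated in full; the proofs are below) =====
def Claim_equal_function_compound_extraction : Prop := ∀ (dep : List String) (text : List String) (pos : List String), Dom_function_compound_extraction dep text pos → Pre_function_compound_extraction dep text pos → Spec_function_compound_extraction dep text pos (function_compound_extraction dep text pos)

-- ===== LEMMAS AND PROOFS =====

theorem pvRunEnd_spec (dep : List String) (j : Nat) :
    j ≤ pvRunEnd dep j ∧
    (j < dep.length → pvRunEnd dep j < dep.length) ∧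
    (∀ t, j < t → t ≤ pvRunEnd dep j → dep.getD t "" == "compound") ∧
    (pvRunEnd dep j + 1 < dep.length → ¬(dep.getD (pvRunEnd dep j + 1) "" == "compound")) := by
  induction j using pvRunEnd.induct dep with
  | case1 k h hd ih =>
      obtain ⟨ih1, ih2, ih3, ih4⟩ := ih
      rw [pvRunEnd, dif_pos h, if_pos hd]
      refine ⟨by omega, fun _ => ih2 h, ?_, ih4⟩
      intro t ht1 ht2
      rcases Nat.eq_or_lt_of_le (Nat.succ_le_of_lt ht1) with he | hlt
      · rw [← he]; exact hd
      · exact ih3 t (by omega) ht2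
  | case2 k h hd =>
      rw [pvRunEnd, dif_pos h, if_neg hd]
      refine ⟨le_refl _, fun hk => by omega, ?_, ?_⟩
      · intro t ht1 ht2; omega
      · intro _; exact hd
  | case3 k h =>
      rw [pvRunEnd, dif_neg h]
      exact ⟨le_refl _, fun hk => by omega, fun t ht1 ht2 => by omega, fun hk => by omega⟩

theorem pvTruncA_eq_take (l : List Nat) (c : Nat)
    (hlen : c < l.length)
    (hstep : ∀ i, i + 1 < c → l.getD (i + 1) 0 - l.getD i 0 = 1)
    (hgap : l.getD c 0 - l.getD (c - 1) 0 ≠ 1) :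
    ∀ i, i < c → pvTruncA l i = l.take c := by
  intro i
  induction i using pvTruncA.induct l with
  | case1 i h hd =>
      intro hic
      rw [pvTruncA, dif_pos h, if_pos hd]
      rcases Nat.lt_or_ge (i + 1) c with h2 | h2
      · exact absurd (hstep i h2) hd
      · have : i + 1 = c := by omega
        rw [this]
  | case2 i h hd ih =>
      intro hic
      rw [pvTruncA, dif_pos h, if_neg hd]
      rcases Nat.lt_or_ge (i + 1) c with h2 | h2
      · exact ih h2
      · exfalso; apply hgap
        have e1 : c = i + 1 := by omega
        have e2 : c - 1 = i := by omega
        rw [e2, e1]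
        exact not_not.mp hd
  | case3 i h =>
      intro hic; omega

theorem pvDashLoopA_eq (l : List String) :
    ∀ i, pvDashLoopA l i = (pvFirstDash (l.drop i)).getD "No change" := by
  intro i
  induction i using pvDashLoopA.induct l with
  | case1 i h hd =>
      rw [pvDashLoopA, dif_pos h, if_pos hd]
      rw [List.drop_eq_getElem_cons h, pvFirstDash]
      rw [List.getD_eq_getElem l "" h] at hd ⊢
      simp only [PySem.Str.isIn, show "-".toList = ['-'] from rfl] at hd
      simp [hd]
  | case2 i h hd ih =>
      rw [pvDashLoopA, dif_pos h, if_neg hd]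
      rw [ih, List.drop_eq_getElem_cons h, pvFirstDash]
      rw [List.getD_eq_getElem l "" h] at hd
      simp only [PySem.Str.isIn, show "-".toList = ['-'] from rfl] at hd
      simp [hd]
  | case3 i h =>
      rw [pvDashLoopA, dif_neg h]
      rw [List.drop_eq_nil_of_le (by omega), pvFirstDash]
      simp

theorem max?_range' (j c : Nat) (hc : 1 ≤ c) :
    PySem.List.max? (List.range' j c) (fun x => x) = some (j + c - 1) := by
  rcases hm : PySem.List.max? (List.range' j c) (fun x => x) with _ | m
  · rw [PySem.List.max?_eq_none_iff] at hm
    have : (List.range' j c).length = c := List.length_range'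
    rw [hm] at this; simp at this; omega
  · have hmem := PySem.List.max?_mem hm
    have hmax := PySem.List.max?_isMax hm
    rw [List.mem_range'_1] at hmem
    have hlast : j + c - 1 ∈ List.range' j c := by rw [List.mem_range'_1]; omega
    have := hmax _ hlast
    simp only [Option.some.injEq]
    omega

theorem indexs2_eq (dep1 : List String) (hc : "compound" ∈ dep1) :
    (let indexs := (List.range dep1.length).filter (fun t => dep1.getD t "" == "compound")
     if ((PySem.List.max? indexs (fun x => x)).getD 0) - ((PySem.List.min? indexs (fun x => x)).getD 0)
         == indexs.length - 1 then
       indexs ++ [((PySem.List.max? indexs (fun x => x)).getD 0) + 1]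
     else
       (pvTruncA indexs 0) ++ [((PySem.List.max? (pvTruncA indexs 0) (fun x => x)).getD 0) + 1])
    = List.range' ((PySem.List.index? dep1 "compound").getD 0)
        (pvRunEnd dep1 ((PySem.List.index? dep1 "compound").getD 0) + 2
          - (PySem.List.index? dep1 "compound").getD 0) := by
  -- first index j and its properties
  have hsome : (PySem.List.index? dep1 "compound").isSome := by
    rw [PySem.List.index?_isSome_iff]; exact hc
  obtain ⟨j, hj⟩ := Option.isSome_iff_exists.mp hsome
  obtain ⟨hjlen, hjval, hjmin⟩ := PySem.List.getElem_of_index?_eq_some hj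
  rw [hj]
  simp only [Option.getD_some]
  set n := dep1.length with hn
  set k := pvRunEnd dep1 j with hk
  obtain ⟨hk1, hk2, hk3, hk4⟩ := pvRunEnd_spec dep1 j
  rw [← hk] at hk1 hk2 hk3 hk4
  have hkn : k < n := hk2 hjlen
  set p : Nat → Bool := fun t => dep1.getD t "" == "compound" with hp
  have hptrue : ∀ t, j ≤ t → t ≤ k → p t = true := by
    intro t ht1 ht2
    rcases Nat.eq_or_lt_of_le ht1 with he | hlt
    · simp only [hp, ← he, List.getD_eq_getElem dep1 "" hjlen, hjval, beq_self_eq_true]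
    · exact hk3 t hlt ht2
  have hpfalse_lo : ∀ t, t < j → p t = false := by
    intro t ht
    have htlen : t < n := by omega
    simp only [hp, List.getD_eq_getElem dep1 "" htlen]
    exact beq_eq_false_iff_ne.mpr (hjmin t ht)
  have hpfalse_next : k + 1 < n → p (k + 1) = false := by
    intro h; have h2 := hk4 h
    simp only [hp]
    exact Bool.eq_false_iff.mpr h2
  -- decompose range n
  have hsplit : List.range n = List.range' 0 j ++ List.range' j (k + 1 - j) ++ List.range' (k + 1) (n - (k + 1)) := by
    rw [List.range_eq_range']
    rw [show List.range' j (k + 1 - j) = List.range' (0 + 1 * j) (k + 1 - j) by norm_num,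
        List.range'_append,
        show List.range' (k + 1) (n - (k + 1)) = List.range' (0 + 1 * (j + (k + 1 - j))) (n - (k + 1)) by congr 1; omega,
        List.range'_append]
    congr 1
    omega
  have hf1 : (List.range' 0 j).filter p = [] := by
    rw [List.filter_eq_nil_iff]
    intro t ht
    rw [List.mem_range'_1] at ht
    simp [hpfalse_lo t (by omega)]
  have hf2 : (List.range' j (k + 1 - j)).filter p = List.range' j (k + 1 - j) := by
    rw [List.filter_eq_self]
    intro t ht
    rw [List.mem_range'_1] at ht
    exact hptrue t ht.1 (by omega)
  set t' := (List.range' (k + 1) (n - (k + 1))).filter p with ht'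
  have ht'mem : ∀ x ∈ t', k + 2 ≤ x ∧ x < n := by
    intro x hx
    rw [ht', List.mem_filter, List.mem_range'_1] at hx
    obtain ⟨⟨hx1, hx2⟩, hx3⟩ := hx
    have hxn : x < n := by omega
    constructor
    · rcases Nat.eq_or_lt_of_le hx1 with he | hlt
      · exfalso
        rw [← he] at hx3
        rw [hpfalse_next (by omega)] at hx3
        exact Bool.false_ne_true hx3
      · omega
    · omega
  set c := k + 1 - j with hcdef
  have hc1 : 1 ≤ c := by omega
  have hfilter : (List.range n).filter p = List.range' j c ++ t' := by
    rw [hsplit, List.filter_append, List.filter_append, hf1, hf2]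
    simp [ht']
  simp only [hfilter]
  set l1 := List.range' j c with hl1
  -- min of the list is j
  have hjmem : j ∈ l1 ++ t' := by
    rw [List.mem_append, hl1, List.mem_range'_1]
    left; omega
  have hminval : (PySem.List.min? (l1 ++ t') (fun x => x)).getD 0 = j := by
    rcases hm : PySem.List.min? (l1 ++ t') (fun x => x) with _ | m
    · rw [PySem.List.min?_eq_none_iff] at hm
      rw [hm] at hjmem; simp at hjmem
    · have hmem := PySem.List.min?_mem hm
      have hmin := PySem.List.min?_isMin hm
      have h1 := hmin _ hjmem
      have h2 : j ≤ m := by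
        rcases List.mem_append.mp hmem with h | h
        · rw [hl1, List.mem_range'_1] at h; omega
        · have := (ht'mem _ h).1; omega
      simp only [Option.getD_some]; omega
  have hlen1 : l1.length = c := List.length_range'
  -- nodup
  have hnodup : (l1 ++ t').Nodup := by
    rw [← hfilter]
    exact (List.nodup_range).filter p
  rcases ht'nil : t' with _ | ⟨hhd, htl⟩
  · -- contiguous case: the if-branch is taken
    simp only [List.append_nil]
    have hmaxval : (PySem.List.max? l1 (fun x => x)).getD 0 = k := by
      rw [hl1, max?_range' j c hc1]; simp only [Option.getD_some]; omega
    rw [ht'nil, List.append_nil] at hminval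
    rw [hmaxval, hminval, hlen1]
    have hcond : (k - j == c - 1) = true := by
      rw [beq_iff_eq]; omega
    rw [if_pos hcond]
    rw [hl1, show k + 2 - j = c + 1 by omega, List.range'_concat]
    congr 2
    omega
  · -- gap case: the else-branch is taken
    rw [← ht'nil]
    have ht'ne : t' ≠ [] := by rw [ht'nil]; simp
    have hhdmem : hhd ∈ t' := by rw [ht'nil]; simp
    have hhd2 := ht'mem _ hhdmem
    -- max of full list
    rcases hm : PySem.List.max? (l1 ++ t') (fun x => x) with _ | mx
    · rw [PySem.List.max?_eq_none_iff] at hm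
      rw [hm] at hjmem; simp at hjmem
    · have hmxmem := PySem.List.max?_mem hm
      have hmxmax := PySem.List.max?_isMax hm
      -- counting: length ≤ mx - j
      have hsub : (l1 ++ t').toFinset ⊆ (Finset.Icc j mx).erase (k + 1) := by
        intro x hx
        rw [List.mem_toFinset] at hx
        rw [Finset.mem_erase, Finset.mem_Icc]
        have hxub := hmxmax _ hx
        have hxlb : j ≤ x := by
          rcases List.mem_append.mp hx with h | h
          · rw [hl1, List.mem_range'_1] at h; omega
          · have := (ht'mem _ h).1; omega
        have hxne : x ≠ k + 1 := by
          rcases List.mem_append.mp hx with h | h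
          · rw [hl1, List.mem_range'_1] at h; omega
          · have := (ht'mem _ h).1; omega
        exact ⟨hxne, hxlb, hxub⟩
      have hk1mem : k + 1 ∈ Finset.Icc j mx := by
        rw [Finset.mem_Icc]
        have := hmxmax _ (List.mem_append_right l1 hhdmem)
        constructor
        · omega
        · omega
      have hcard : (l1 ++ t').length ≤ mx - j := by
        calc (l1 ++ t').length = (l1 ++ t').toFinset.card := (List.toFinset_card_of_nodup hnodup).symm
          _ ≤ ((Finset.Icc j mx).erase (k + 1)).card := Finset.card_le_card hsub
          _ = (Finset.Icc j mx).card - 1 := Finset.card_erase_of_mem hk1mem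
          _ = mx - j := by rw [Nat.card_Icc]; omega
      have hlenpos : 1 ≤ (l1 ++ t').length := by
        rw [List.length_append, hlen1]; omega
      rw [if_neg (show ¬(((some mx : Option Nat).getD 0 - (PySem.List.min? (l1 ++ t') (fun x => x)).getD 0 == (l1 ++ t').length - 1) = true) by
        rw [hminval]
        simp only [Option.getD_some, beq_iff_eq]
        omega)]
      -- truncation
      have hlenful : c < (l1 ++ t').length := by
        rw [List.length_append, hlen1, ht'nil]; simp
      have hgd : ∀ m, m < c → (l1 ++ t').getD m 0 = j + m := by
        intro m hm2
        rw [List.getD_eq_getElem _ _ (by rw [List.length_append, hlen1]; omega),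
            List.getElem_append_left (by rw [hlen1]; omega)]
        simp [hl1]
      have hgc : (l1 ++ t').getD c 0 = hhd := by
        rw [List.getD_eq_getElem _ _ hlenful,
            List.getElem_append_right (by rw [hlen1])]
        simp [hlen1, ht'nil]
      have htr : pvTruncA (l1 ++ t') 0 = l1 := by
        have htr0 : pvTruncA (l1 ++ t') 0 = (l1 ++ t').take c := by
          apply pvTruncA_eq_take (l1 ++ t') c hlenful ?_ ?_ 0 (by omega)
          · intro i hi
            rw [hgd i (by omega), hgd (i + 1) hi]
            omega
          · rw [hgc, hgd (c - 1) (by omega)]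
            omega
        rw [htr0, ← hlen1, List.take_left]
      rw [htr, hl1, max?_range' j c hc1]
      simp only [Option.getD_some]
      rw [show j + c - 1 + 1 = j + 1 * c by omega]
      rw [show k + 2 - j = c + 1 by omega, List.range'_concat]

theorem stage2_eq (dep1 text1 : List String) : pvStage2A dep1 text1 = pvStage2B dep1 text1 := by
  unfold pvStage2A pvStage2B
  by_cases hc : "compound" ∈ dep1
  · simp only [if_pos hc]
    rw [PySem.List.foldl_append_if (fun t => dep1.getD t "" == "compound") (fun t => t)
        (List.range dep1.length) []]
    rw [List.nil_append, List.map_id']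
    have heq := indexs2_eq dep1 hc
    simp only [] at heq
    rw [heq]
    set j := (PySem.List.index? dep1 "compound").getD 0 with hjdef
    set k := pvRunEnd dep1 j with hkdef
    have hjk : j ≤ k := (pvRunEnd_spec dep1 j).1
    have hmap : (PySem.List.pyRange (j : Int) ((k : Int) + 2) 1).map
        (fun m => PySem.List.pyGetD text1 m "")
        = (List.range' j (k + 2 - j)).map (fun idx => text1.getD idx "") := by
      rw [PySem.List.pyRange_one, List.map_map]
      rw [List.range'_eq_map_range, List.map_map]
      have hcast : ((k : Int) + 2 - (j : Int)).toNat = k + 2 - j := by omega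
      rw [hcast]
      apply List.map_congr_left
      intro t _
      simp only [Function.comp_apply]
      rw [show (j : Int) + (t : Int) = ((j + t : Nat) : Int) by push_cast; ring,
          PySem.List.pyGetD_natCast]
    rw [hmap]
  · simp only [if_neg hc]
    rw [pvDashLoopA_eq text1 0, List.drop_zero]

theorem setDel_eq (xs : List String) (v : String) (i : Nat) (h1 : 1 ≤ i) (hi : i ≤ xs.length) :
    (PySem.List.pySetD xs ((i : Int) - 1) v).take i ++ (PySem.List.pySetD xs ((i : Int) - 1) v).drop (i + 2)
      = xs.take (i - 1) ++ [v] ++ xs.drop (i + 2) := by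
  obtain ⟨i', rfl⟩ : ∃ i', i = i' + 1 := ⟨i - 1, by omega⟩
  have hc : ((i' + 1 : Nat) : Int) - 1 = ((i' : Nat) : Int) := by push_cast; ring
  rw [hc, PySem.List.pySetD_of_nonneg xs v (by positivity), Int.toNat_natCast]
  have hlt : i' < xs.length := by omega
  rw [List.drop_set_of_lt (by omega), List.take_set, List.take_add_one,
      List.getElem?_eq_getElem hlt, List.set_append]
  simp [List.length_take, Nat.min_eq_left (le_of_lt hlt)]

theorem delSet_eq (xs : List String) (v : String) (i : Nat) (h1 : 1 ≤ i) (hi : i + 2 ≤ xs.length) :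
    PySem.List.pySetD (xs.take i ++ xs.drop (i + 2)) ((i : Int) - 1) v
      = xs.take (i - 1) ++ [v] ++ xs.drop (i + 2) := by
  obtain ⟨i', rfl⟩ : ∃ i', i = i' + 1 := ⟨i - 1, by omega⟩
  have hc : ((i' + 1 : Nat) : Int) - 1 = ((i' : Nat) : Int) := by push_cast; ring
  rw [hc, PySem.List.pySetD_of_nonneg _ v (by positivity), Int.toNat_natCast]
  have hlt : i' < xs.length := by omega
  rw [List.set_append]
  simp only [List.length_take, Nat.min_eq_left (show i' + 1 ≤ xs.length by omega),
    Nat.lt_succ_self, if_true]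
  rw [List.take_add_one, List.getElem?_eq_getElem hlt, List.set_append]
  simp [List.length_take, Nat.min_eq_left (le_of_lt hlt)]

theorem sliceAssign_eq (xs : List String) (v : String) (i : Nat) (h1 : 1 ≤ i) (hi : i ≤ xs.length) :
    pvSliceAssign xs ((i : Int) - 1) ((i : Int) + 2) [v]
      = xs.take (i - 1) ++ [v] ++ xs.drop (i + 2) := by
  obtain ⟨i', rfl⟩ : ∃ i', i = i' + 1 := ⟨i - 1, by omega⟩
  have hc : ((i' + 1 : Nat) : Int) - 1 = ((i' : Nat) : Int) := by push_cast; ring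
  have hc2 : ((i' + 1 : Nat) : Int) + 2 = ((i' + 3 : Nat) : Int) := by push_cast; ring
  unfold pvSliceAssign
  rw [hc, hc2, PySem.List.clampIdx_natCast, PySem.List.clampIdx_natCast]
  have hmin : min i' xs.length = i' := by omega
  simp only [hmin]
  have hmax : max i' (min (i' + 3) xs.length) = min (i' + 3) xs.length := by omega
  simp only [hmax]
  by_cases h : i' + 3 ≤ xs.length
  · rw [Nat.min_eq_left h]; simp
  · rw [Nat.min_eq_right (by omega)]
    rw [List.drop_length, List.drop_eq_nil_of_le (by omega)]
    simp

-- ===== VERDICT (by name: the statement is the Claim_ definition above) =====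
theorem function_compound_extraction_spec : Claim_equal_function_compound_extraction := by
  intro dep text pos _hdom hpre
  unfold Spec_function_compound_extraction
  unfold function_compound_extraction function_compound_extraction_alt
  by_cases hp : "PUNCT" ∈ pos
  · obtain ⟨hpre1, -⟩ := hpre
    obtain ⟨h1, hd, hplen, ht⟩ := hpre1 hp
    simp only [hp, if_true]
    rw [setDel_eq text _ _ h1 ht, delSet_eq dep _ _ h1 hd,
        sliceAssign_eq text _ _ h1 ht, sliceAssign_eq dep _ _ h1 (by omega)]
    exact stage2_eq _ _
  · simp only [hp, if_false]
    exact stage2_eq _ _
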